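-- pv_equiv track=rewrite | github.com/Baltasarq/print | print.py | interpret_data
-- ===== SOURCE A (Python) =====
-- ESC_P = {
--     "^[": chr(27),
--     "^v": chr(12),
--     "^l": chr(10),
--     "^r": chr(13),
-- }
--
-- def interpret_data(data: str):
--     """Interprets the data given as a string.
--         The following changes that are carried out
--         are stored in the ESC_P dictionary.
--         :param data: the data to interpret.
--     """
--     i = 0
--     toret = ""
--     while i < len(data):
--         ch = data[i]
--
--         if  (ch == '^'
--         and (i + 1) < len(data)):
--             ch += data[i + 1]
--             i += 1
--         ...
--
--         toret += ESC_P.get(ch, ch)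
--         i += 1
--     ...
--
--     return toret
-- ===== SOURCE B (Python) =====
-- ESC_P = {
--     "^[": chr(27),
--     "^v": chr(12),
--     "^l": chr(10),
--     "^r": chr(13),
-- }
--
-- def interpret_data(data: str):
--     # Split on '^': each delimiter pairs with the first char of the following
--     # segment; an empty segment means the next char was another '^' (pair '^^'),
--     # or a lone trailing '^'.
--     parts = data.split('^')
--     out = [parts[0]]
--     i = 1
--     while i < len(parts):
--         p = parts[i]
--         if p:
--             key = '^' + p[0]
--             out.append(ESC_P.get(key, key) + p[1:])
--             i += 1
--         elif i + 1 < len(parts):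
--             out.append('^^' + parts[i + 1])
--             i += 2
--         else:
--             out.append('^')
--             i += 1
--     return ''.join(out)
-- ===== Notes on version B (the rewrite author's own statement) =====
-- stated objective: faster
-- what changed: B replaces A's index-driven char-by-char while loop with repeated string concatenation by a single split on the escape introducer and a join: each segment after a delimiter contributes its head char as the escape pair, empty segments encoding a caret pair or a trailing lone delimiter.
import Mathlib
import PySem

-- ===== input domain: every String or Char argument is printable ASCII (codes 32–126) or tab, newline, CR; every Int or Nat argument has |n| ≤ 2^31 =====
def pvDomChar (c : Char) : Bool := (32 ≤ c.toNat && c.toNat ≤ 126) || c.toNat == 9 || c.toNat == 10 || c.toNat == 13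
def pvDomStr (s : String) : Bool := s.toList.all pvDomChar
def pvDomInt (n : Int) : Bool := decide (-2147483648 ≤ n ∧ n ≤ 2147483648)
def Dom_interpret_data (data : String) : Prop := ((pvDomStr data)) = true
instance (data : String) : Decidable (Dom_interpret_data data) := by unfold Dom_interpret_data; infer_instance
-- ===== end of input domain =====

-- B rewrites A's index-driven character scan as one split on '^' with a pass over the segments (objective: alternative).

-- ===== PORT A =====
-- ESC_P, keys and values as lists of code points
def pvESC_P : PySem.Dict (List Char) (List Char) :=
  PySem.Dict.ofList
    [(['^', '['], [Char.ofNat 27]), (['^', 'v'], [Char.ofNat 12]),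
     (['^', 'l'], [Char.ofNat 10]), (['^', 'r'], [Char.ofNat 13])]

-- the while loop of A: ch = data[i]; if ch == '^' and i+1 < len(data): ch += data[i+1]; i += 1
-- then toret += ESC_P.get(ch, ch); i += 1 — as structural recursion on the remaining characters
def pvInterpA : List Char → List Char
  | [] => []
  | '^' :: c2 :: rest => pvESC_P.getD ['^', c2] ['^', c2] ++ pvInterpA rest
  | c :: rest => pvESC_P.getD [c] [c] ++ pvInterpA rest

def interpret_data (data : String) : String := String.ofList (pvInterpA data.toList)

-- ===== PORT B =====
-- B's while loop over parts[1:], consuming one part (nonempty head segment or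
-- trailing lone '^') or two parts (empty segment = '^^' pair) per step
def pvAltLoop : List (List Char) → List (List Char)
  | [] => []
  | (c :: tl) :: rest => (pvESC_P.getD ['^', c] ['^', c] ++ tl) :: pvAltLoop rest
  | [] :: q :: rest => (['^', '^'] ++ q) :: pvAltLoop rest
  | [] :: [] => [['^']]

-- data.split('^') ported as List.splitOn on the code points; ''.join as flatten
def interpret_data_alt (data : String) : String :=
  match (data.toList).splitOn '^' with
  | [] => ""  -- unreachable: split never returns an empty list
  | p0 :: rest => String.ofList (p0 ++ (pvAltLoop rest).flatten)

-- ===== PRECONDITION & SPEC =====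
def Spec_interpret_data (data : String) (out : String) : Prop := out = interpret_data_alt data
instance (data : String) (out : String) : Decidable (Spec_interpret_data data out) := by unfold Spec_interpret_data; infer_instance

-- ===== CLAIM (what is proved, stated in full; the proofs are below) =====
def Claim_equal_interpret_data : Prop := ∀ (data : String), Dom_interpret_data data → Spec_interpret_data data (interpret_data data)

-- ===== LEMMAS AND PROOFS =====

-- a single character is never a key of ESC_P (all keys have two characters)
theorem pvESC_P_eq_mk : pvESC_P = PySem.Dict.mk
    [(['^', '['], [Char.ofNat 27]), (['^', 'v'], [Char.ofNat 12]),
     (['^', 'l'], [Char.ofNat 10]), (['^', 'r'], [Char.ofNat 13])] := by decide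

theorem pvESC_P_getD_single (c : Char) : pvESC_P.getD [c] [c] = [c] := by
  simp [pvESC_P_eq_mk, PySem.Dict.getD, PySem.Dict.get?]

def pvAltTop : List (List Char) → List Char
  | [] => []
  | p0 :: rest => p0 ++ (pvAltLoop rest).flatten

theorem pvSplitOn_ne_nil (xs : List Char) : xs.splitOn '^' ≠ [] := by
  simp [List.splitOn]
  exact List.splitOnP_ne_nil _ xs

theorem pvInterpA_cons_ne (c : Char) (rest : List Char) (hc : c ≠ '^') :
    pvInterpA (c :: rest) = pvESC_P.getD [c] [c] ++ pvInterpA rest := by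
  cases rest <;> (rw [pvInterpA.eq_def]; simp [hc])

theorem pvInterpA_eq_altTop (xs : List Char) :
    pvInterpA xs = pvAltTop (xs.splitOn '^') := by
  have h2 : pvESC_P.getD ['^', '^'] ['^', '^'] = ['^', '^'] := by decide
  induction xs using pvInterpA.induct with
  | case1 => decide
  | case2 c2 rest ih =>
      rcases hs : rest.splitOn '^' with _ | ⟨r0, rs⟩
      · exact absurd hs (pvSplitOn_ne_nil rest)
      · by_cases hc : c2 = '^'
        · subst hc
          simp only [List.splitOn] at hs ⊢
          simp [pvInterpA, pvAltTop, pvAltLoop, List.splitOnP_cons, hs, ih, h2, List.splitOn]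
        · simp only [List.splitOn] at hs ⊢
          simp [pvInterpA, pvAltTop, pvAltLoop, List.splitOnP_cons, hs, hc, ih, List.splitOn]
  | case3 c rest h ih =>
      rcases hs : rest.splitOn '^' with _ | ⟨r0, rs⟩
      · exact absurd hs (pvSplitOn_ne_nil rest)
      · by_cases hc : c = '^'
        · subst hc
          -- here rest = [] (otherwise case2 applied); h rules out the two-char pattern
          match rest, hs with
          | [], hs =>
            simp only [List.splitOn, List.splitOnP_nil] at hs
            cases hs
            decide
          | c2 :: rest', _ => exact (h c2 rest' rfl rfl).elim
        · rw [pvInterpA_cons_ne c rest hc]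
          have hs' : List.splitOnP (fun x => x == '^') rest = r0 :: rs := by
            simpa [List.splitOn] using hs
          simp [pvAltTop, List.splitOn, List.splitOnP_cons, hs', hc, ih, pvESC_P_getD_single]

-- ===== VERDICT (by name: the statement is the Claim_ definition above) =====
theorem interpret_data_spec : Claim_equal_interpret_data := by
  intro data _
  show _ = _
  unfold interpret_data interpret_data_alt
  rw [pvInterpA_eq_altTop]
  rcases h : (data.toList).splitOn '^' with _ | ⟨p0, rest⟩
  · exact absurd h (pvSplitOn_ne_nil _)
  · rfl
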